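-- pv_equiv track=rewrite | github.com/aorursy/new-nb-5 | peacemaket_tweet-sentiment-extraction.py | bert_post_processing
-- ===== SOURCE A (Python) =====
-- def bert_post_processing(source_text, bert_tokens, occurancies, prediction_mask):
--     # source_text: str 'text' from train/test df
--     # predicted_text: str after tokenizer.convert_tokens_to_string method
--     source_text = source_text.split(' ')
--
--     index0 = 0
--     predicted_text = []
--     local_word = ''
--     isInclude = False
--     for index, tkn in enumerate(bert_tokens):
--         isInclude |= prediction_mask[index]
--         local_word += tkn.replace('##', '')
--         if local_word == source_text[index0]:
--             if isInclude:
--                 predicted_text.append(source_text[index0])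
--             local_word = ''
--             index0 += 1
--             isInclude = False
--     return ' '.join(predicted_text)
-- ===== SOURCE B (Python) =====
-- def bert_post_processing(source_text, bert_tokens, occurancies, prediction_mask):
--     # Word-driven inversion of the task: clean all tokens up front, then for each
--     # source word consume the shortest run of cleaned tokens concatenating to it;
--     # keep the word iff any mask bit in that run is set.  Tokens exhausted
--     # mid-word ends the reconstruction early.
--     toks = [t.replace('##', '') for t in bert_tokens]
--     kept = []
--     pos = 0
--     for w in source_text.split(' '):
--         acc = ''
--         k = 0
--         while True:
--             if pos + k == len(toks):
--                 return ' '.join(kept)   # ran out of tokens inside this word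
--             acc += toks[pos + k]
--             k += 1
--             if acc == w:
--                 break
--         if any(prediction_mask[pos:pos + k]):
--             kept.append(w)
--         pos += k
--     return ' '.join(kept)
-- ===== Notes on version B (the rewrite author's own statement) =====
-- stated objective: alternative
-- what changed: B inverts A's control flow: instead of A's single loop over tokens carrying a mutable word index and an OR-accumulated inclusion flag, B pre-cleans all tokens and loops over the source words, each word consuming via an inner search loop the shortest run of cleaned tokens that concatenates to it, deciding inclusion by any() over the mask slice of that run and returning early when tokens run out mid-word.
-- outside the precondition, e.g. on bert_post_processing('ab c', ['abc', 'x'], [], [False, False]): A returns '', B returns ''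
import Mathlib
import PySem

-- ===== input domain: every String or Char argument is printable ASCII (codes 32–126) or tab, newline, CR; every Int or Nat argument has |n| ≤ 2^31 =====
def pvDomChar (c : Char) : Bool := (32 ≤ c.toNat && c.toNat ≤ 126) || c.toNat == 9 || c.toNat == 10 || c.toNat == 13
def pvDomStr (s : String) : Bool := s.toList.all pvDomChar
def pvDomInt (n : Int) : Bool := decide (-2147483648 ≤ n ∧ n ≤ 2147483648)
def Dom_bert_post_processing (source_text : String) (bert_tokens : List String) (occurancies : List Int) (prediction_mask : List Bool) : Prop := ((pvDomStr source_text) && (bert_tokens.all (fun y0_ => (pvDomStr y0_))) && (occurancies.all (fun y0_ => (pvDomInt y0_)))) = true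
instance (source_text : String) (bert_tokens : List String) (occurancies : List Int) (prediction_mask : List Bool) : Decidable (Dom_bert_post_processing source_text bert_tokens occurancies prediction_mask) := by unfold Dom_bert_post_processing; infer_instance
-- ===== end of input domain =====

-- B inverts A's control: an outer loop over the source words, each consuming the
-- shortest run of pre-cleaned tokens concatenating to it, inclusion decided by
-- any() over the mask slice of the run (objective: alternative decomposition, same cost).

-- ===== PORT A =====
def bppClean (t : String) : String := PySem.Str.replace t "##" ""

def bppLoopA (words : List String) (mask : List Bool) :
    List String → Nat → Nat → String → Bool → List String → Option (List String)
  | [], _, _, _, _, acc => some acc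
  | tkn :: rest, idx, index0, localWord, isInclude, acc =>
    match PySem.List.pyGet? mask (idx : Int) with
    | none => none  -- prediction_mask[index] : IndexError
    | some m =>
      let isInclude := isInclude || m
      let localWord := localWord ++ bppClean tkn
      match PySem.List.pyGet? words (index0 : Int) with
      | none => none  -- source_text[index0] : IndexError
      | some w =>
        if localWord == w then
          bppLoopA words mask rest (idx+1) (index0+1) "" false
            (if isInclude then acc ++ [w] else acc)
        else
          bppLoopA words mask rest (idx+1) index0 localWord isInclude acc

def bert_post_processing (source_text : String) (bert_tokens : List String) (occurancies : List Int) (prediction_mask : List Bool) : String :=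
  let words := (PySem.Str.split? source_text " ").getD []
  match bppLoopA words prediction_mask bert_tokens 0 0 "" false [] with
  | some predicted => PySem.Str.join " " predicted
  | none => ""  -- Python raises here; such inputs are excluded by Pre_

-- ===== PORT B =====
-- inner search loop of B: consume cleaned tokens until the accumulator equals w;
-- returns (number of tokens consumed, remaining tokens), none if tokens run out.
def bppEat (w : String) (acc : String) : List String → Option (Nat × List String)
  | [] => none
  | t :: rest =>
    let acc' := acc ++ t
    if acc' == w then some (1, rest)
    else (bppEat w acc' rest).map (fun kr => (kr.1 + 1, kr.2))

-- outer loop of B over the source words ('pos' is the index of the next token).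
def bppWordsB (mask : List Bool) : List String → List String → Nat → List String
  | [], _, _ => []
  | w :: ws, toks, pos =>
    match bppEat w "" toks with
    | none => []  -- tokens exhausted mid-word: B's early return
    | some (k, rest) =>
      (if (PySem.List.slice mask ((pos : Nat) : Int) (((pos + k : Nat)) : Int)).any id
       then [w] else [])
        ++ bppWordsB mask ws rest (pos + k)

def bert_post_processing_alt (source_text : String) (bert_tokens : List String) (occurancies : List Int) (prediction_mask : List Bool) : String :=
  let words := (PySem.Str.split? source_text " ").getD []
  let toks := bert_tokens.map bppClean
  PySem.Str.join " " (bppWordsB prediction_mask words toks 0)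

-- ===== PRECONDITION & SPEC =====
-- plain concatenation of a list of strings (used only to state Pre_'s second conjunct)
def bppJ : List String → String
  | [] => ""
  | t :: r => t ++ bppJ r

-- Pre_ excludes inputs on which A raises IndexError: masks shorter than the token
-- list, and token lists some PROPER prefix of which, cleaned of '##' and
-- concatenated, equals the whole de-spaced source text (then the word index can
-- run past the last word).  The second conjunct is slightly conservative: it also
-- excludes a rare returning input where that prefix equality holds accidentally
-- without the words actually being consumed (see cites).
def Pre_bert_post_processing (source_text : String) (bert_tokens : List String) (occurancies : List Int) (prediction_mask : List Bool) : Prop :=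
  bert_tokens.length ≤ prediction_mask.length ∧
  ∀ j : Nat, j < bert_tokens.length - 1 →
    bppJ ((bert_tokens.take (j+1)).map bppClean) ≠
      bppJ ((PySem.Str.split? source_text " ").getD [])
instance (source_text : String) (bert_tokens : List String) (occurancies : List Int) (prediction_mask : List Bool) : Decidable (Pre_bert_post_processing source_text bert_tokens occurancies prediction_mask) := by unfold Pre_bert_post_processing; infer_instance

def pvWitness_bert_post_processing : String × List String × List Int × List Bool :=
  ("a b", ["a", "b"], [], [true, false])

def Spec_bert_post_processing (source_text : String) (bert_tokens : List String) (occurancies : List Int) (prediction_mask : List Bool) (out : String) : Prop := out = bert_post_processing_alt source_text bert_tokens occurancies prediction_mask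
instance (source_text : String) (bert_tokens : List String) (occurancies : List Int) (prediction_mask : List Bool) (out : String) : Decidable (Spec_bert_post_processing source_text bert_tokens occurancies prediction_mask out) := by unfold Spec_bert_post_processing; infer_instance

-- ===== CLAIM (what is proved, stated in full; the proofs are below) =====
def Claim_equal_bert_post_processing : Prop := ∀ (source_text : String) (bert_tokens : List String) (occurancies : List Int) (prediction_mask : List Bool), Dom_bert_post_processing source_text bert_tokens occurancies prediction_mask → Pre_bert_post_processing source_text bert_tokens occurancies prediction_mask → Spec_bert_post_processing source_text bert_tokens occurancies prediction_mask (bert_post_processing source_text bert_tokens occurancies prediction_mask)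

-- ===== LEMMAS AND PROOFS =====

-- proof-only: B's outer loop with an 'ok' flag distinguishing the early return
-- caused by token exhaustion (ok = true, as in B) from the word-index overrun on
-- which A raises (ok = false).
def bppWordsO (mask : List Bool) : List String → List String → Nat → List String × Bool
  | [], [], _ => ([], true)
  | [], _ :: _, _ => ([], false)
  | w :: ws, toks, pos =>
    match bppEat w "" toks with
    | none => ([], true)
    | some (k, rest) =>
      let r := bppWordsO mask ws rest (pos + k)
      ((if (PySem.List.slice mask ((pos : Nat) : Int) (((pos + k : Nat)) : Int)).any id
        then [w] else []) ++ r.1, r.2)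

theorem bppWordsB_eq_O (mask : List Bool) :
    ∀ (ws toks : List String) (pos : Nat),
      bppWordsB mask ws toks pos = (bppWordsO mask ws toks pos).1 := by
  intro ws
  induction ws with
  | nil => intro toks pos; cases toks <;> rfl
  | cons w ws ih =>
    intro toks pos
    simp only [bppWordsB, bppWordsO]
    cases bppEat w "" toks with
    | none => rfl
    | some kr => simp [ih]

theorem bppJ_append (a b : List String) : bppJ (a ++ b) = bppJ a ++ bppJ b := by
  induction a with
  | nil => simp [bppJ]
  | cons t r ih => simp [bppJ, ih, String.append_assoc]

theorem bppEat_spec (w : String) :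
    ∀ (toks : List String) (acc : String) (k : Nat) (rest : List String),
      bppEat w acc toks = some (k, rest) →
      1 ≤ k ∧ k ≤ toks.length ∧ rest = toks.drop k ∧
        acc ++ bppJ (toks.take k) = w := by
  intro toks
  induction toks with
  | nil => intro acc k rest h; simp [bppEat] at h
  | cons t r ih =>
    intro acc k rest h
    simp only [bppEat] at h
    by_cases hm : (acc ++ t == w) = true
    · simp only [hm, if_pos] at h
      obtain ⟨hk, hr⟩ : (1 : Nat) = k ∧ r = rest := by
        have := Option.some.inj h; exact ⟨congrArg Prod.fst this, congrArg Prod.snd this⟩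
      subst hk; subst hr
      refine ⟨le_refl 1, by simp, by simp, ?_⟩
      have hv := eq_of_beq hm
      simpa [bppJ, String.append_empty] using hv
    · simp only [hm, if_neg, Bool.false_eq_true, not_false_iff] at h
      cases he : bppEat w (acc ++ t) r with
      | none => rw [he] at h; simp at h
      | some kr =>
        rw [he] at h; simp at h
        obtain ⟨hk, hr⟩ := h
        obtain ⟨h1, h2, h3, h4⟩ := ih (acc ++ t) kr.1 kr.2 (by rw [he])
        subst hk
        refine ⟨by omega, by simp; omega, by simpa [List.drop_succ_cons] using hr ▸ h3, ?_⟩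
        rw [List.take_succ_cons]
        simpa [bppJ, String.append_assoc] using h4

-- the slice of one more element at the front
theorem bpp_slice_cons (mask : List Bool) (s k : Nat) (hs : s < mask.length) :
    PySem.List.slice mask (some (s : Int)) (some ((s + (k+1) : Nat) : Int))
      = mask[s] :: PySem.List.slice mask (some ((s+1 : Nat) : Int)) (some ((s+1+k : Nat) : Int)) := by
  rw [PySem.List.slice_natCast, PySem.List.slice_natCast]
  rw [show s + (k+1) - s = k + 1 by omega, show s+1+k - (s+1) = k by omega]
  conv_lhs => rw [List.drop_eq_getElem_cons hs]
  rw [List.take_succ_cons]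

theorem bpp_slice_one (mask : List Bool) (s : Nat) (hs : s < mask.length) :
    PySem.List.slice mask (some (s : Int)) (some ((s + 1 : Nat) : Int)) = [mask[s]] := by
  have h := bpp_slice_cons mask s 0 hs
  rw [h, PySem.List.slice_natCast]
  simp

-- INNER: A's token loop, from a fresh-or-mid-word state at word w, equals B's
-- inner search (bppEat) followed by A's loop on the remaining tokens.
theorem bpp_inner (words : List String) (mask : List Bool) (index0 : Nat) (w : String)
    (hw : PySem.List.pyGet? words (index0 : Int) = some w) :
    ∀ (toks : List String) (idx : Nat) (localWord : String) (isInclude : Bool)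
      (acc : List String),
      idx + toks.length ≤ mask.length →
      bppLoopA words mask toks idx index0 localWord isInclude acc =
        match bppEat w localWord (toks.map bppClean) with
        | none => some acc
        | some (k, _) =>
          bppLoopA words mask (toks.drop k) (idx + k) (index0 + 1) "" false
            (if isInclude || (PySem.List.slice mask ((idx : Nat) : Int) (((idx + k : Nat)) : Int)).any id
             then acc ++ [w] else acc) := by
  intro toks
  induction toks with
  | nil => intro idx localWord isInclude acc _; simp [bppLoopA, bppEat]
  | cons t rest ih =>
    intro idx localWord isInclude acc hlen
    have hidx : idx < mask.length := by simp at hlen; omega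
    have hmask : PySem.List.pyGet? mask (idx : Int) = some mask[idx] := by
      rw [PySem.List.pyGet?_natCast]; simp [hidx]
    simp only [bppLoopA, hmask, hw, List.map_cons, bppEat]
    by_cases hm : (localWord ++ bppClean t == w) = true
    · simp only [hm, if_pos]
      rw [bpp_slice_one mask idx hidx]
      simp [List.drop_succ_cons]
    · simp only [hm, if_neg, Bool.false_eq_true, not_false_iff]
      rw [ih (idx+1) (localWord ++ bppClean t) (isInclude || mask[idx]) acc
            (by simp at hlen ⊢; omega)]
      cases he : bppEat w (localWord ++ bppClean t) (rest.map bppClean) with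
      | none => simp
      | some kr =>
        simp only [Option.map_some, List.drop_succ_cons]
        have hsl : (PySem.List.slice mask ((idx : Nat) : Int) (((idx + (kr.1+1) : Nat)) : Int)).any id
            = (mask[idx] || (PySem.List.slice mask (((idx+1 : Nat)) : Int) (((idx+1+kr.1 : Nat)) : Int)).any id) := by
          rw [bpp_slice_cons mask idx kr.1 hidx]; simp
        rw [hsl, show idx + (kr.1 + 1) = idx + 1 + kr.1 by omega, Bool.or_assoc]

-- OUTER: A's loop from a fresh state equals B's word loop (with the ok flag).
theorem bpp_outer (words : List String) (mask : List Bool) :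
    ∀ (N : Nat) (toks : List String), toks.length ≤ N →
    ∀ (idx index0 : Nat) (acc : List String),
      idx + toks.length ≤ mask.length →
      bppLoopA words mask toks idx index0 "" false acc =
        (if (bppWordsO mask (words.drop index0) (toks.map bppClean) idx).2
         then some (acc ++ (bppWordsO mask (words.drop index0) (toks.map bppClean) idx).1)
         else none) := by
  intro N
  induction N with
  | zero =>
    intro toks hN idx index0 acc hlen
    have htn : toks = [] := List.length_eq_zero_iff.mp (by omega)
    subst htn
    cases hd : words.drop index0 with
    | nil => simp [bppLoopA, bppWordsO]
    | cons w ws => simp [bppLoopA, bppWordsO, bppEat]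
  | succ n ih =>
    intro toks hN idx index0 acc hlen
    cases hd : words.drop index0 with
    | nil =>
      have hnone : PySem.List.pyGet? words (index0 : Int) = none := by
        rw [PySem.List.pyGet?_natCast]
        have hge : words.length ≤ index0 := by
          by_contra hc
          push_neg at hc
          have h2 := List.drop_eq_getElem_cons hc
          rw [hd] at h2; simp at h2; omega
        simp [List.getElem?_eq_none hge]
      cases toks with
      | nil => simp [bppLoopA, bppWordsO]
      | cons t rest =>
        have hidx : idx < mask.length := by simp at hlen; omega
        have hmask : PySem.List.pyGet? mask (idx : Int) = some mask[idx] := by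
          rw [PySem.List.pyGet?_natCast]; simp [hidx]
        simp [bppLoopA, hmask, hnone, bppWordsO]
    | cons w ws =>
      have hlt : index0 < words.length := by
        by_contra hc
        push_neg at hc
        rw [List.drop_eq_nil_of_le hc] at hd; simp at hd
      have hw : PySem.List.pyGet? words (index0 : Int) = some w := by
        rw [PySem.List.pyGet?_natCast]
        have h2 := List.drop_eq_getElem_cons hlt
        rw [hd] at h2
        simp [List.getElem?_eq_getElem hlt, (List.cons.injEq .. ▸ h2).1]
      rw [bpp_inner words mask index0 w hw toks idx "" false acc hlen]
      simp only [bppWordsO, hd]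
      cases he : bppEat w "" (toks.map bppClean) with
      | none => simp
      | some kr =>
        obtain ⟨k, krest⟩ := kr
        dsimp only
        obtain ⟨h1, h2, h3, _⟩ := bppEat_spec w (toks.map bppClean) "" k krest he
        have hds : words.drop (index0 + 1) = ws := by
          have h5 : (words.drop index0).drop 1 = ws := by rw [hd]; rfl
          rwa [List.drop_drop] at h5
        have hmap : (toks.drop k).map bppClean = krest := by
          rw [h3, List.map_drop]
        rw [ih (toks.drop k)
              (by simp at h2 ⊢; omega)
              (idx + k) (index0 + 1)
              (if (false || (PySem.List.slice mask ((idx : Nat) : Int) (((idx + k : Nat)) : Int)).any id)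
               then acc ++ [w] else acc)
              (by simp at hlen h2 ⊢; omega)]
        rw [hds, hmap]
        simp only [Bool.false_or]
        cases hok : (bppWordsO mask ws krest (idx + k)).2 <;>
          split_ifs <;> simp_all

-- overrun characterisation: ok = false means some proper token prefix spells the whole word list
theorem bpp_overrun (mask : List Bool) :
    ∀ (ws toks : List String) (pos : Nat),
      (bppWordsO mask ws toks pos).2 = false →
      ∃ n, n < toks.length ∧ bppJ (toks.take n) = bppJ ws ∧ (1 ≤ n ∨ ws = []) := by
  intro ws
  induction ws with
  | nil =>
    intro toks pos h
    cases toks with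
    | nil => simp [bppWordsO] at h
    | cons t r => exact ⟨0, by simp, by simp [bppJ], Or.inr rfl⟩
  | cons w ws ih =>
    intro toks pos h
    simp only [bppWordsO] at h
    cases he : bppEat w "" toks with
    | none => rw [he] at h; simp at h
    | some kr =>
      rw [he] at h
      simp at h
      obtain ⟨n, hn, hj, _⟩ := ih kr.2 (pos + kr.1) h
      obtain ⟨h1, h2, h3, h4⟩ := bppEat_spec w toks "" kr.1 kr.2 he
      refine ⟨kr.1 + n, by rw [h3] at hn; simp at hn; omega, ?_, Or.inl (by omega)⟩
      rw [List.take_add, ← h3, bppJ_append, hj]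
      have hw : bppJ (toks.take kr.1) = w := by
        simpa [String.empty_append] using h4
      rw [hw]
      simp [bppJ]

-- ===== VERDICT (by name: the statement is the Claim_ definition above) =====
theorem bert_post_processing_spec : Claim_equal_bert_post_processing := by
  intro source_text bert_tokens occurancies prediction_mask _ hpre
  obtain ⟨hlen, hpref⟩ := hpre
  unfold Spec_bert_post_processing bert_post_processing bert_post_processing_alt
  dsimp only
  set words := (PySem.Str.split? source_text " ").getD [] with hwords
  have h := bpp_outer words prediction_mask bert_tokens.length bert_tokens (le_refl _)
    0 0 [] (by simpa using hlen)
  simp only [List.drop_zero, List.nil_append] at h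
  rw [bppWordsB_eq_O]
  cases hok : (bppWordsO prediction_mask words (bert_tokens.map bppClean) 0).2 with
  | true => rw [h, hok]; simp
  | false =>
    -- A's loop raised (word index overran); Pre_'s second conjunct forbids this
    -- unless words = [], in which case both sides are the empty string anyway.
    obtain ⟨n, hn, hj, hcase⟩ := bpp_overrun prediction_mask words (bert_tokens.map bppClean) 0 hok
    rcases hcase with h1 | hwnil
    · exfalso
      apply hpref (n-1) (by simp at hn; omega)
      rw [show n - 1 + 1 = n by omega, List.map_take]
      exact hj
    · rw [hwnil] at h hok ⊢
      rw [h, hok]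
      cases htk : bert_tokens.map bppClean with
      | nil => rw [htk] at hok; simp [bppWordsO] at hok
      | cons a b =>
        simp [bppWordsO]
        decide
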